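-- pv_equiv track=rewrite | github.com/SrijaAdhya12/python-programs | accenture/superior_element.py | find_superior_element
-- ===== SOURCE A (Python) =====
-- def find_superior_element(num_list):
--     max_element = float("-inf")
--     total_count = 0
--
--     for i in range(len(num_list)-1,-1,-1):
--         if num_list[i] > max_element:
--             max_element = num_list[i]
--             total_count += 1
--     return total_count
-- ===== SOURCE B (Python) =====
-- def find_superior_element(num_list):
--     suf = []
--     m = float('-inf')
--     for x in reversed(num_list):
--         suf.append(m)
--         m = max(m, x)
--     suf.reverse()
--     return sum(1 for x, s in zip(num_list, suf) if x > s)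
-- ===== Notes on version B (the rewrite author's own statement) =====
-- stated objective: alternative
-- what changed: B first materialises a suffix-maximum array in one backward pass, then counts in a separate forward pass over zip(num_list, suf), instead of A's single backward index loop that folds the running max and count together.
import Mathlib
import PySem

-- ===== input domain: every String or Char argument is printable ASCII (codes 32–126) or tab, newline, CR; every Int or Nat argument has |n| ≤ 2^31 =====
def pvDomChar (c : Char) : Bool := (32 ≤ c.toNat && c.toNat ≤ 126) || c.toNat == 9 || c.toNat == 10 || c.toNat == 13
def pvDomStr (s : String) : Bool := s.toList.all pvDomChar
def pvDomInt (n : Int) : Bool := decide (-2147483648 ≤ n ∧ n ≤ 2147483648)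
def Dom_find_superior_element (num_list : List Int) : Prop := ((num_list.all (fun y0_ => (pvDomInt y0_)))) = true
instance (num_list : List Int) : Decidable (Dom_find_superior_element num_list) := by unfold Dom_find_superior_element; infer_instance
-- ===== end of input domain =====

-- B builds an explicit suffix-maximum array in a backward pass and then counts in a
-- separate forward pass, instead of A's fused backward loop; same O(n) cost (alternative decomposition).

-- ===== PORT A =====
-- `none` plays the role of Python's float('-inf') sentinel; pvLtOpt m x is Python's `x > m`.
def pvLtOpt (m : Option Int) (x : Int) : Bool :=
  match m with
  | none => true
  | some v => v < x

-- A's `for i in range(len-1,-1,-1): num_list[i]` visits exactly the elements of num_list.reverse.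
def find_superior_element (num_list : List Int) : Int :=
  (num_list.reverse.foldl
    (fun (st : Option Int × Int) x =>
      if pvLtOpt st.1 x then (some x, st.2 + 1) else st)
    (none, 0)).2

-- ===== PORT B =====
def find_superior_element_alt (num_list : List Int) : Int :=
  -- backward pass: suf collects, for each position of the reversed list, the max seen so far
  let p := num_list.reverse.foldl
    (fun (st : List (Option Int) × Option Int) x =>
      (st.1 ++ [st.2], if pvLtOpt st.2 x then some x else st.2))
    ([], none)
  let suf := p.1.reverse
  -- forward pass: count positions whose element beats its suffix maximum
  (((num_list.zip suf).filter (fun xs => pvLtOpt xs.2 xs.1)).length : Int)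

-- ===== PRECONDITION & SPEC =====
def Spec_find_superior_element (num_list : List Int) (out : Int) : Prop := out = find_superior_element_alt num_list
instance (num_list : List Int) (out : Int) : Decidable (Spec_find_superior_element num_list out) := by unfold Spec_find_superior_element; infer_instance

-- ===== CLAIM (what is proved, stated in full; the proofs are below) =====
def Claim_equal_find_superior_element : Prop := ∀ (num_list : List Int), Dom_find_superior_element num_list → Spec_find_superior_element num_list (find_superior_element num_list)

-- ===== LEMMAS AND PROOFS =====

-- ===== VERDICT (by name: the statement is the Claim_ definition above) =====
-- prefixes r m : the running-max value (A's max_element) seen just before each element of r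
def pvPrefixes : List Int → Option Int → List (Option Int)
  | [], _ => []
  | x :: xs, m => m :: pvPrefixes xs (if pvLtOpt m x then some x else m)

theorem pvPrefixes_length (r : List Int) (m : Option Int) :
    (pvPrefixes r m).length = r.length := by
  induction r generalizing m with
  | nil => rfl
  | cons x xs ih => simp [pvPrefixes, ih]

theorem pvFoldB_fst (r : List Int) (suf : List (Option Int)) (m : Option Int) :
    (r.foldl (fun (st : List (Option Int) × Option Int) x =>
        (st.1 ++ [st.2], if pvLtOpt st.2 x then some x else st.2)) (suf, m)).1
    = suf ++ pvPrefixes r m := by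
  induction r generalizing suf m with
  | nil => simp [pvPrefixes]
  | cons x xs ih => simp [List.foldl_cons, ih, pvPrefixes]

theorem pvFoldA_snd (r : List Int) (m : Option Int) (c : Int) :
    (r.foldl (fun (st : Option Int × Int) x =>
        if pvLtOpt st.1 x then (some x, st.2 + 1) else st) (m, c)).2
    = c + (((r.zip (pvPrefixes r m)).filter (fun xs => pvLtOpt xs.2 xs.1)).length : Int) := by
  induction r generalizing m c with
  | nil => simp
  | cons x xs ih =>
    simp only [List.foldl_cons, pvPrefixes, List.zip_cons_cons, List.filter_cons]
    by_cases h : pvLtOpt m x = true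
    · simp [h, ih, List.length_cons]
      ring
    · simp [h, ih]

theorem pvZip_reverse {A B : Type} (l : List A) (l' : List B) (h : l.length = l'.length) :
    l.reverse.zip l'.reverse = (l.zip l').reverse := by
  induction l generalizing l' with
  | nil => cases l' with
    | nil => simp
    | cons y ys => simp at h
  | cons x xs ih =>
    cases l' with
    | nil => simp at h
    | cons y ys =>
      simp only [List.length_cons] at h
      simp only [List.reverse_cons, List.zip_cons_cons]
      rw [List.zip_append (by simpa using by omega)]
      simp [ih ys (by omega)]

theorem find_superior_element_spec : Claim_equal_find_superior_element := by
  intro l _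
  unfold Spec_find_superior_element find_superior_element find_superior_element_alt
  dsimp only
  rw [pvFoldB_fst, pvFoldA_snd]
  simp only [List.nil_append, zero_add]
  have hz := pvZip_reverse l.reverse (pvPrefixes l.reverse none)
    (pvPrefixes_length l.reverse none).symm
  rw [List.reverse_reverse] at hz
  rw [hz, List.filter_reverse, List.length_reverse]
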